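-- pv_equiv track=rewrite | github.com/adityaeucloid/company-research-agent | app.py | extract_expandable_sections
-- ===== SOURCE A (Python) =====
-- def extract_expandable_sections(data):
--     """Extract sections that should be displayed as expandable tables."""
--     expandable_sections = {
--         'Current Directors & Key Managerial Personnel': [],
--         'Subsidiary Companies': [],
--         'GST Details': []
--     }
--
--     main_data = data.copy()
--
--     # Extract expandable sections
--     for section in expandable_sections.keys():
--         if section in data:
--             expandable_sections[section] = data[section]
--             del main_data[section]
--
--     # Extract GST details from main data
--     gst_details = []
--     for key, value in list(main_data.items()):
--         if key.startswith('GST'):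
--             if isinstance(value, list):
--                 gst_details.extend(value)
--             else:
--                 gst_details.append(value)
--             del main_data[key]
--
--     if gst_details:
--         expandable_sections['GST Details'] = gst_details
--
--     return main_data, expandable_sections
-- ===== SOURCE B (Python) =====
-- SECTION_NAMES = (
--     'Current Directors & Key Managerial Personnel',
--     'Subsidiary Companies',
--     'GST Details',
-- )
--
--
-- def extract_expandable_sections(data):
--     """Extract sections that should be displayed as expandable tables."""
--     expandable_sections = {name: [] for name in SECTION_NAMES}
--     main_data = {}
--     gst_details = []
--     for key, value in data.items():
--         if key in expandable_sections:
--             expandable_sections[key] = value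
--         elif key.startswith('GST'):
--             if isinstance(value, list):
--                 gst_details.extend(value)
--             else:
--                 gst_details.append(value)
--         else:
--             main_data[key] = value
--     if gst_details:
--         expandable_sections['GST Details'] = gst_details
--     return main_data, expandable_sections
-- ===== Notes on version B (the rewrite author's own statement) =====
-- stated objective: simpler
-- what changed: One single pass over data.items() routing each entry into section/GST/main buckets (section test before the GST-prefix test), instead of copying the dict and running two separate delete-while-scanning loops over it.
import Mathlib
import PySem

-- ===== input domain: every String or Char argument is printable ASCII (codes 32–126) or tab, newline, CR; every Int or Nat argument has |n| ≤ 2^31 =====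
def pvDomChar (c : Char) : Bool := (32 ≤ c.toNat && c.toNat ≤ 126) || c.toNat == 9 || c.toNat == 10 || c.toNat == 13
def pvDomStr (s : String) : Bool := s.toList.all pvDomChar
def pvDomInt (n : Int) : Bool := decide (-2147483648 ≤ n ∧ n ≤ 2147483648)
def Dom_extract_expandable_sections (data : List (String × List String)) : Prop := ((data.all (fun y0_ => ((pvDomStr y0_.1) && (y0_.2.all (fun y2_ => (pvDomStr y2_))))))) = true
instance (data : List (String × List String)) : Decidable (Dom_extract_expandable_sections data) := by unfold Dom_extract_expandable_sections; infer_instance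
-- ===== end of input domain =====

-- B replaces A's copy-then-two-delete-loops dict surgery by one pass over the items that
-- routes each entry into the section / GST / main bucket (objective: simpler, same cost).


-- the three section names of the Python source
def pvSec1 : String := "Current Directors & Key Managerial Personnel"
def pvSec2 : String := "Subsidiary Companies"
def pvSec3 : String := "GST Details"

-- ===== PORT A =====
-- literal transliteration of A: dict copy, loop over the three section keys (delete each
-- found one from the copy), then a loop over a snapshot of the remaining items collecting
-- GST-prefixed entries (values here are always lists, so isinstance(value, list) is true
-- and only the extend branch is reachable).
def extract_expandable_sections (data : List (String × List String)) : (List (String × List String)) × (List (String × List String)) :=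
  let d : PySem.Dict String (List String) := PySem.Dict.mk data
  let es0 : PySem.Dict String (List String) := PySem.Dict.mk [(pvSec1, []), (pvSec2, []), (pvSec3, [])]
  let p1 := [pvSec1, pvSec2, pvSec3].foldl
    (fun (st : PySem.Dict String (List String) × PySem.Dict String (List String)) s =>
      if d.contains s then (st.1.insert s (d.getD s []), st.2.erase s) else st)
    (es0, d)
  let p2 := p1.2.items.foldl
    (fun (st : List String × PySem.Dict String (List String)) kv =>
      if PySem.Str.startswith kv.1 "GST" then (st.1 ++ kv.2, st.2.erase kv.1) else st)
    ([], p1.2)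
  let es := if p2.1 ≠ [] then p1.1.insert pvSec3 p2.1 else p1.1
  (p2.2.items, es.items)

-- ===== PORT B =====
-- literal transliteration of B (Source B): one pass over the items, three buckets
-- (sections dict, gst list, main dict), then the final GST override.
def extract_expandable_sections_alt (data : List (String × List String)) : (List (String × List String)) × (List (String × List String)) :=
  let st := data.foldl
    (fun (st : PySem.Dict String (List String) × PySem.Dict String (List String) × List String) kv =>
      if st.2.1.contains kv.1 then (st.1, st.2.1.insert kv.1 kv.2, st.2.2)
      else if PySem.Str.startswith kv.1 "GST" then (st.1, st.2.1, st.2.2 ++ kv.2)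
      else (st.1.insert kv.1 kv.2, st.2.1, st.2.2))
    (PySem.Dict.empty, PySem.Dict.mk [(pvSec1, []), (pvSec2, []), (pvSec3, [])], [])
  let es := if st.2.2 ≠ [] then st.2.1.insert pvSec3 st.2.2 else st.2.1
  (st.1.items, es.items)

-- ===== PRECONDITION & SPEC =====
-- Pre_ excludes association lists with duplicate keys: they do not encode any Python dict
-- (dict keys are unique), so no Python behaviour is defined for them.
def Pre_extract_expandable_sections (data : List (String × List String)) : Prop :=
  (data.map Prod.fst).Nodup
instance (data : List (String × List String)) : Decidable (Pre_extract_expandable_sections data) := by unfold Pre_extract_expandable_sections; infer_instance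

def pvWitness_extract_expandable_sections : (List (String × List String)) :=
  [("GST Registrations", ["g1", "g2"]), ("Name", ["Acme"]), ("Subsidiary Companies", ["S"])]

def Spec_extract_expandable_sections (data : List (String × List String)) (out : (List (String × List String)) × (List (String × List String))) : Prop := out = extract_expandable_sections_alt data
instance (data : List (String × List String)) (out : (List (String × List String)) × (List (String × List String))) : Decidable (Spec_extract_expandable_sections data out) := by unfold Spec_extract_expandable_sections; infer_instance

-- ===== CLAIM (what is proved, stated in full; the proofs are below) =====
def Claim_equal_extract_expandable_sections : Prop := ∀ (data : List (String × List String)), Dom_extract_expandable_sections data → Pre_extract_expandable_sections data → Spec_extract_expandable_sections data (extract_expandable_sections data)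

-- ===== LEMMAS AND PROOFS =====

-- proof-side abbreviations
def gstP (k : String) : Bool := PySem.Str.startswith k "GST"
def secB (k : String) : Bool := (k == pvSec1 || k == pvSec2 || k == pvSec3)
def pvG (l : List (String × List String)) (s : String) : List String :=
  (PySem.Dict.mk l).getD s []

lemma erase_not_contains {ν : Type} (d : PySem.Dict String ν) (k : String)
    (h : d.contains k = false) : d.erase k = d := by
  apply PySem.Dict.ext
  simp only [PySem.Dict.erase, PySem.Dict.contains, List.any_eq_false] at *
  exact List.filter_eq_self.mpr (fun p hp => by simp [h p hp])

lemma contains_erase {ν : Type} (d : PySem.Dict String ν) (k k' : String) :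
    (d.erase k').contains k = (d.contains k && !(k == k')) := by
  simp only [PySem.Dict.erase, PySem.Dict.contains]
  induction d.items with
  | nil => rfl
  | cons p t ih =>
    simp only [List.filter_cons, List.any_cons]
    cases hp : p.1 == k' <;> cases hq : p.1 == k <;>
      simp_all [List.any_cons] <;> simp_all [beq_iff_eq]

lemma md_erase3 (data : List (String × List String)) :
    (((PySem.Dict.mk data).erase pvSec1).erase pvSec2).erase pvSec3
    = PySem.Dict.mk (data.filter (fun p => !secB p.1)) := by
  apply PySem.Dict.ext
  simp only [PySem.Dict.erase, PySem.Dict.items, List.filter_filter]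
  exact List.filter_congr (fun p _ => by
    simp [secB]; cases h1 : p.1 == pvSec1 <;> cases h2 : p.1 == pvSec2 <;> cases h3 : p.1 == pvSec3 <;> simp_all)

lemma ne21 : pvSec2 ≠ pvSec1 := by decide
lemma ne31 : pvSec3 ≠ pvSec1 := by decide
lemma ne12 : pvSec1 ≠ pvSec2 := by decide
lemma ne32 : pvSec3 ≠ pvSec2 := by decide
lemma ne13 : pvSec1 ≠ pvSec3 := by decide
lemma ne23 : pvSec2 ≠ pvSec3 := by decide

lemma loop1_eq (data : List (String × List String)) :
    ([pvSec1, pvSec2, pvSec3].foldl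
      (fun (st : PySem.Dict String (List String) × PySem.Dict String (List String)) s =>
        if (PySem.Dict.mk data).contains s then
          (st.1.insert s ((PySem.Dict.mk data).getD s []), st.2.erase s) else st)
      (PySem.Dict.mk [(pvSec1, []), (pvSec2, []), (pvSec3, [])], PySem.Dict.mk data))
    = (PySem.Dict.mk [(pvSec1, pvG data pvSec1), (pvSec2, pvG data pvSec2), (pvSec3, pvG data pvSec3)],
       PySem.Dict.mk (data.filter (fun p => !secB p.1))) := by
  rw [← md_erase3]
  simp only [List.foldl_cons, List.foldl_nil]
  cases h1 : (PySem.Dict.mk data).contains pvSec1 <;>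
    cases h2 : (PySem.Dict.mk data).contains pvSec2 <;>
      cases h3 : (PySem.Dict.mk data).contains pvSec3 <;>
        simp only [h1, h2, h3, if_true, if_false, Bool.false_eq_true, Bool.true_eq_false] <;>
        simp [pvG, PySem.Dict.insert, ne21,ne31,ne12,ne32,ne13,ne23,
              PySem.Dict.getD_of_not_contains, h1, h2, h3, contains_erase,
              erase_not_contains]

lemma loop2_eq (l : List (String × List String)) :
    ∀ (g : List String) (m : PySem.Dict String (List String)),
    l.foldl (fun (st : List String × PySem.Dict String (List String)) kv =>
        if PySem.Str.startswith kv.1 "GST" then (st.1 ++ kv.2, st.2.erase kv.1) else st) (g, m)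
    = (g ++ (l.filter (fun p => gstP p.1)).flatMap (fun p => p.2),
       l.foldl (fun m p => if gstP p.1 then m.erase p.1 else m) m) := by
  induction l with
  | nil => simp
  | cons p t ih =>
    intro g m
    simp only [List.foldl_cons, List.filter_cons]
    cases h : gstP p.1 <;> simp_all [gstP, List.flatMap_cons]

lemma eraseFold_items (l : List (String × List String)) :
    ∀ (m : PySem.Dict String (List String)),
    (l.foldl (fun m p => if gstP p.1 then m.erase p.1 else m) m).items
    = m.items.filter (fun q => !(l.any (fun p => gstP p.1 && q.1 == p.1))) := by
  induction l with
  | nil => simp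
  | cons p t ih =>
    intro m
    simp only [List.foldl_cons, List.any_cons]
    cases h : gstP p.1
    · rw [show (if (false : Bool) = true then m.erase p.1 else m) = m from rfl, ih]
      exact List.filter_congr (fun q _ => by simp)
    · rw [show (if (true : Bool) = true then m.erase p.1 else m) = m.erase p.1 from rfl, ih]
      have he : (m.erase p.1).items = m.items.filter (fun q => !(q.1 == p.1)) := rfl
      rw [he, List.filter_filter]
      exact List.filter_congr (fun q _ => by
        cases hq : q.1 == p.1 <;> simp [hq, Bool.not_or])

lemma eraseFold_self (l : List (String × List String)) :
    (l.foldl (fun m p => if gstP p.1 then m.erase p.1 else m) (PySem.Dict.mk l)).items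
    = l.filter (fun q => !gstP q.1) := by
  rw [eraseFold_items]
  refine List.filter_congr (fun q hq => ?_)
  congr 1
  cases h : gstP q.1
  · simp only [List.any_eq_false]
    intro p hp
    cases hqp : q.1 == p.1
    · simp
    · simp only [beq_iff_eq] at hqp
      simp [← hqp, h]
  · simp only [List.any_eq_true]
    exact ⟨q, hq, by simp [h]⟩

lemma contains_of_keys (es : PySem.Dict String (List String))
    (hk : es.keys = [pvSec1, pvSec2, pvSec3]) (k : String) :
    es.contains k = secB k := by
  rw [PySem.Dict.contains_eq_decide_mem_keys, hk]
  simp only [secB, List.mem_cons, List.not_mem_nil, or_false]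
  cases h1 : k == pvSec1 <;> cases h2 : k == pvSec2 <;> cases h3 : k == pvSec3 <;>
    simp_all [beq_iff_eq]

lemma bfold_eq (l : List (String × List String)) :
    ∀ (md es : PySem.Dict String (List String)) (g : List String),
    es.keys = [pvSec1, pvSec2, pvSec3] →
    l.foldl (fun (st : PySem.Dict String (List String) × PySem.Dict String (List String) × List String) kv =>
        if st.2.1.contains kv.1 then (st.1, st.2.1.insert kv.1 kv.2, st.2.2)
        else if PySem.Str.startswith kv.1 "GST" then (st.1, st.2.1, st.2.2 ++ kv.2)
        else (st.1.insert kv.1 kv.2, st.2.1, st.2.2)) (md, es, g)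
    = ((l.filter (fun p => !secB p.1 && !gstP p.1)).foldl (fun m p => m.insert p.1 p.2) md,
       (l.filter (fun p => secB p.1)).foldl (fun e p => e.insert p.1 p.2) es,
       g ++ (l.filter (fun p => !secB p.1 && gstP p.1)).flatMap (fun p => p.2)) := by
  induction l with
  | nil => intro md es g hk; simp
  | cons p t ih =>
    intro md es g hk
    simp only [List.foldl_cons, List.filter_cons, contains_of_keys es hk,
      show PySem.Str.startswith p.1 "GST" = gstP p.1 from rfl]
    cases hs : secB p.1
    · cases hg : gstP p.1
      · rw [show (if (false : Bool) = true then (md, es.insert p.1 p.2, g)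
              else if (false : Bool) = true then (md, es, g ++ p.2)
              else (md.insert p.1 p.2, es, g))
            = (md.insert p.1 p.2, es, g) from rfl]
        rw [ih _ _ _ hk]
        simp
      · rw [show (if (false : Bool) = true then (md, es.insert p.1 p.2, g)
              else if (true : Bool) = true then (md, es, g ++ p.2)
              else (md.insert p.1 p.2, es, g))
            = (md, es, g ++ p.2) from rfl]
        rw [ih _ _ _ hk]
        simp [List.flatMap_cons, List.append_assoc]
    · rw [show (if (true : Bool) = true then (md, es.insert p.1 p.2, g)
            else if gstP p.1 = true then (md, es, g ++ p.2)
            else (md.insert p.1 p.2, es, g))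
          = (md, es.insert p.1 p.2, g) from rfl]
      have hc : es.contains p.1 = true := by rw [contains_of_keys es hk, hs]
      have hk' : (es.insert p.1 p.2).keys = [pvSec1, pvSec2, pvSec3] := by
        simp [PySem.Dict.keys_insert_of_contains, hc, hk]
      rw [ih _ _ _ hk']
      simp

lemma secB_cases {k : String} (h : secB k = true) :
    k = pvSec1 ∨ k = pvSec2 ∨ k = pvSec3 := by
  simp only [secB, Bool.or_eq_true, beq_iff_eq] at h
  tauto

lemma tripleFold_eq : ∀ (l : List (String × List String)),
    (l.map Prod.fst).Nodup → (∀ p ∈ l, secB p.1 = true) →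
    ∀ (a b c : List String),
    l.foldl (fun e p => e.insert p.1 p.2) (PySem.Dict.mk [(pvSec1, a), (pvSec2, b), (pvSec3, c)])
    = PySem.Dict.mk [(pvSec1, (PySem.Dict.mk l).getD pvSec1 a),
                     (pvSec2, (PySem.Dict.mk l).getD pvSec2 b),
                     (pvSec3, (PySem.Dict.mk l).getD pvSec3 c)] := by
  intro l
  induction l with
  | nil => intro _ _ a b c; rfl
  | cons p t ih =>
    intro hnd hsec a b c
    obtain ⟨k, v⟩ := p
    simp only [List.map_cons, List.nodup_cons] at hnd
    obtain ⟨hmem, hnd'⟩ := hnd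
    have hsec' : ∀ q ∈ t, secB q.1 = true := fun q hq => hsec q (List.mem_cons_of_mem _ hq)
    have hnone : ∀ s : String, s ∉ t.map Prod.fst → (PySem.Dict.mk t).get? s = none := by
      intro s hsmem
      rw [PySem.Dict.get?_eq_none_iff_not_mem_keys]
      simpa [PySem.Dict.keys] using hsmem
    rcases secB_cases (hsec (k, v) (List.mem_cons_self)) with rfl | rfl | rfl
    · simp only [List.foldl_cons]
      rw [show (PySem.Dict.mk [(pvSec1, a), (pvSec2, b), (pvSec3, c)]).insert pvSec1 v
            = PySem.Dict.mk [(pvSec1, v), (pvSec2, b), (pvSec3, c)] from by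
              simp [PySem.Dict.insert, ne21, ne31], ih hnd' hsec' v b c]
      simp [PySem.Dict.getD, PySem.Dict.get?_mk_cons, ne12, ne21, ne13, ne31, ne23, ne32,
            hnone _ hmem]
    · simp only [List.foldl_cons]
      rw [show (PySem.Dict.mk [(pvSec1, a), (pvSec2, b), (pvSec3, c)]).insert pvSec2 v
            = PySem.Dict.mk [(pvSec1, a), (pvSec2, v), (pvSec3, c)] from by
              simp [PySem.Dict.insert, ne12, ne32], ih hnd' hsec' a v c]
      simp [PySem.Dict.getD, PySem.Dict.get?_mk_cons, ne12, ne21, ne13, ne31, ne23, ne32,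
            hnone _ hmem]
    · simp only [List.foldl_cons]
      rw [show (PySem.Dict.mk [(pvSec1, a), (pvSec2, b), (pvSec3, c)]).insert pvSec3 v
            = PySem.Dict.mk [(pvSec1, a), (pvSec2, b), (pvSec3, v)] from by
              simp [PySem.Dict.insert, ne13, ne23], ih hnd' hsec' a b v]
      simp [PySem.Dict.getD, PySem.Dict.get?_mk_cons, ne12, ne21, ne13, ne31, ne23, ne32,
            hnone _ hmem]

lemma get?_filter_sec (l : List (String × List String)) (s : String) (hs : secB s = true) :
    (PySem.Dict.mk (l.filter (fun p => secB p.1))).get? s = (PySem.Dict.mk l).get? s := by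
  induction l with
  | nil => rfl
  | cons p t ih =>
    simp only [List.filter_cons]
    cases hq : p.1 == s
    · cases hp : secB p.1
      · simp only [Bool.false_eq_true, if_false, ih]
        rw [PySem.Dict.get?_mk_cons]
        simp [hq]
      · simp only [if_true]
        rw [PySem.Dict.get?_mk_cons, PySem.Dict.get?_mk_cons]
        simp [hq, ih]
    · have : p.1 = s := by simpa [beq_iff_eq] using hq
      have hp : secB p.1 = true := this ▸ hs
      simp only [hp, if_true]
      rw [PySem.Dict.get?_mk_cons, PySem.Dict.get?_mk_cons]
      simp [hq]

lemma items_fold_insert (l : List (String × List String)) (h : (l.map Prod.fst).Nodup) :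
    (l.foldl (fun m p => m.insert p.1 p.2) (PySem.Dict.empty : PySem.Dict String (List String))).items = l := by
  have := PySem.Dict.items_foldl_insert_fresh l (fun p => p.1) (fun p => p.2) PySem.Dict.empty
    (fun a _ => PySem.Dict.contains_empty _) (by exact h)
  simpa using this

lemma main_eq (data : List (String × List String)) (hpre : (data.map Prod.fst).Nodup) :
    extract_expandable_sections data = extract_expandable_sections_alt data := by
  have hMD : (data.filter (fun p => !secB p.1)).filter (fun q => !gstP q.1)
      = data.filter (fun p => !secB p.1 && !gstP p.1) := by
    rw [List.filter_filter]; exact List.filter_congr (fun x _ => Bool.and_comm _ _)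
  have hG : (data.filter (fun p => !secB p.1)).filter (fun p => gstP p.1)
      = data.filter (fun p => !secB p.1 && gstP p.1) := by
    rw [List.filter_filter]; exact List.filter_congr (fun x _ => Bool.and_comm _ _)
  have hndSec : ((data.filter (fun p => secB p.1)).map Prod.fst).Nodup :=
    hpre.sublist (List.Sublist.map Prod.fst List.filter_sublist)
  have hndMain : ((data.filter (fun p => !secB p.1 && !gstP p.1)).map Prod.fst).Nodup :=
    hpre.sublist (List.Sublist.map Prod.fst List.filter_sublist)
  have hsecAll : ∀ p ∈ data.filter (fun p => secB p.1), secB p.1 = true :=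
    fun p hp => (List.mem_filter.mp hp).2
  unfold extract_expandable_sections extract_expandable_sections_alt
  simp only []
  rw [loop1_eq]
  simp only [Prod.fst, Prod.snd, PySem.Dict.items]
  rw [loop2_eq]
  simp only [Prod.fst, Prod.snd]
  rw [eraseFold_self, bfold_eq data _ _ _ rfl]
  simp only [Prod.fst, Prod.snd]
  rw [items_fold_insert _ hndMain, tripleFold_eq _ hndSec hsecAll [] [] []]
  simp only [pvG, PySem.Dict.getD, List.nil_append]
  rw [get?_filter_sec data pvSec1 (by decide), get?_filter_sec data pvSec2 (by decide),
      get?_filter_sec data pvSec3 (by decide), hMD, hG]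

-- ===== VERDICT (by name: the statement is the Claim_ definition above) =====
theorem extract_expandable_sections_spec : Claim_equal_extract_expandable_sections := by
  intro data _ hpre
  exact main_eq data hpre
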